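-- pv_equiv track=rewrite | github.com/andypymont/adventofcode | 2015/day24.py | smallest_first_groups
-- ===== SOURCE A (Python) =====
-- from itertools import combinations
-- from typing import Sequence
--
-- ParcelGroup = Sequence[int]
--
-- def smallest_first_groups(
--     parcels: ParcelGroup, groups: int = 3
-- ) -> Sequence[ParcelGroup]:
--     """
--     Determine all possible smallest first groups for the given group of parcels.
--     """
--     group_weight = sum(parcel for parcel in parcels) // groups
--     for group_size in range(1, len(parcels)):
--         matches = [
--             combo
--             for combo in combinations(parcels, group_size)
--             if sum(combo) == group_weight
--         ]
--         if matches: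
--             return matches
--     return []
-- ===== SOURCE B (Python) =====
-- from typing import Sequence
--
-- ParcelGroup = Sequence[int]
--
-- def smallest_first_groups(
--     parcels: ParcelGroup, groups: int = 3
-- ) -> Sequence[ParcelGroup]:
--     """
--     One recursive include/exclude walk over the parcels collects every
--     subset (of size 1..len(parcels)-1) whose sum is the target weight,
--     in ascending-index (lexicographic) order; the result is the
--     collected subsets of minimal size.
--     """
--     target = sum(parcels) // groups
--     n = len(parcels)
--     found = []
--
--     def walk(rest, s, chosen):
--         if not rest:
--             if s == target and 1 <= len(chosen) < n:
--                 found.append(tuple(chosen))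
--             return
--         walk(rest[1:], s + rest[0], chosen + (rest[0],))
--         walk(rest[1:], s, chosen)
--
--     walk(list(parcels), 0, ())
--     if not found:
--         return []
--     best = min(len(c) for c in found)
--     return [c for c in found if len(c) == best]
-- ===== Notes on version B (the rewrite author's own statement) =====
-- stated objective: alternative
-- what changed: Replaces the size-by-size itertools.combinations scan (restarting subset generation for every candidate size) with a single recursive include/exclude backtracking walk over the parcels that collects every qualifying subset once in lexicographic order, then returns those of minimal size.
-- outside the precondition, e.g. on smallest_first_groups([1, 2, 3], 0): A raises ZeroDivisionError, B raises ZeroDivisionError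
import Mathlib
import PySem

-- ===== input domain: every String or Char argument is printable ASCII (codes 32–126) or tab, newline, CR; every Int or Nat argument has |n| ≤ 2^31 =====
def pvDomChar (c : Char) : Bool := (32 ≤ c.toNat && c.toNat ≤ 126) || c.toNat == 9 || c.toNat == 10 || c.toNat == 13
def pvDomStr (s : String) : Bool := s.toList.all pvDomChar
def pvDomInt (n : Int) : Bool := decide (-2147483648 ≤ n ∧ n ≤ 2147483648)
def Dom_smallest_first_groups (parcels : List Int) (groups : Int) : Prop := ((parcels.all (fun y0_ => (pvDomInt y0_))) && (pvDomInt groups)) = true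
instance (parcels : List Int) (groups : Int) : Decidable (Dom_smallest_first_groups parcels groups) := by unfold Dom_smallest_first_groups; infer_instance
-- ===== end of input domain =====

-- B replaces A's size-by-size combinations scan by one include/exclude DFS over the
-- parcels that collects every qualifying subset once, then keeps the minimal-size ones
-- (objective: alternative decomposition; same return value).

-- ===== PORT A =====
-- matches for one group_size (the list comprehension inside the loop)
def pvMatchesA (parcels : List Int) (gw : Int) (k : Nat) : List (List Int) :=
  (PySem.List.combinations parcels k).filter (fun c => c.sum == gw)

-- 'for group_size in range(1, len(parcels)): … if matches: return matches' / 'return []'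
def pvLoopA (parcels : List Int) (gw : Int) : List Nat → List (List Int)
  | [] => []
  | k :: ks =>
      if (pvMatchesA parcels gw k).isEmpty then pvLoopA parcels gw ks
      else pvMatchesA parcels gw k

def smallest_first_groups (parcels : List Int) (groups : Int) : List (List Int) :=
  let gw := PySem.Int.floordiv parcels.sum groups
  -- range(1, len(parcels)) — exact: both bounds are nonnegative
  pvLoopA parcels gw (List.range' 1 (parcels.length - 1))

-- ===== PORT B =====
-- the recursive include/exclude walk of Source B, appending into 'found'
def pvWalkB (target : Int) (n : Nat) : List Int → Int → List Int → List (List Int) → List (List Int)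
  | [], s, chosen, found =>
      if s = target ∧ 1 ≤ chosen.length ∧ chosen.length < n then found ++ [chosen] else found
  | x :: xs, s, chosen, found =>
      pvWalkB target n xs s chosen (pvWalkB target n xs (s + x) (chosen ++ [x]) found)

def smallest_first_groups_alt (parcels : List Int) (groups : Int) : List (List Int) :=
  let target := PySem.Int.floordiv parcels.sum groups
  let found := pvWalkB target parcels.length parcels 0 [] []
  match PySem.List.min? (found.map List.length) (fun x => x) with
  | none => []
  | some best => found.filter (fun c => c.length == best)

-- ===== PRECONDITION & SPEC =====
-- Pre_ excludes only groups = 0, where Python A (and B) raise ZeroDivisionError.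
def Pre_smallest_first_groups (parcels : List Int) (groups : Int) : Prop := groups ≠ 0
instance (parcels : List Int) (groups : Int) : Decidable (Pre_smallest_first_groups parcels groups) := by unfold Pre_smallest_first_groups; infer_instance
def pvWitness_smallest_first_groups : List Int × Int := ([1, 2, 3, 4, 5, 6], 3)

def Spec_smallest_first_groups (parcels : List Int) (groups : Int) (out : List (List Int)) : Prop := out = smallest_first_groups_alt parcels groups
instance (parcels : List Int) (groups : Int) (out : List (List Int)) : Decidable (Spec_smallest_first_groups parcels groups out) := by unfold Spec_smallest_first_groups; infer_instance

-- ===== CLAIM (what is proved, stated in full; the proofs are below) =====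
def Claim_equal_smallest_first_groups : Prop := ∀ (parcels : List Int) (groups : Int), Dom_smallest_first_groups parcels groups → Pre_smallest_first_groups parcels groups → Spec_smallest_first_groups parcels groups (smallest_first_groups parcels groups)

-- ===== LEMMAS AND PROOFS =====

-- all subsequences of xs, in the DFS (include-first) order pvWalkB visits them
def pvSubs : List Int → List (List Int)
  | [] => [[]]
  | x :: xs => (pvSubs xs).map (x :: ·) ++ pvSubs xs

def pvCond (t : Int) (n : Nat) (c : List Int) : Bool :=
  decide (c.sum = t ∧ 1 ≤ c.length ∧ c.length < n)

theorem pvWalkB_eq (t : Int) (n : Nat) :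
    ∀ (rest chosen : List Int) (found : List (List Int)),
    pvWalkB t n rest chosen.sum chosen found
      = found ++ ((pvSubs rest).map (chosen ++ ·)).filter (pvCond t n) := by
  intro rest
  induction rest with
  | nil =>
      intro chosen found
      show (if chosen.sum = t ∧ 1 ≤ chosen.length ∧ chosen.length < n then found ++ [chosen] else found)
          = found ++ (((pvSubs []).map (chosen ++ ·)).filter (pvCond t n))
      have hm : (pvSubs []).map (chosen ++ ·) = [chosen] := by simp [pvSubs]
      rw [hm]
      by_cases h : chosen.sum = t ∧ 1 ≤ chosen.length ∧ chosen.length < n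
      · have hc : pvCond t n chosen = true := by unfold pvCond; exact decide_eq_true h
        rw [if_pos h]
        simp [List.filter, hc]
      · have hc : pvCond t n chosen = false := by unfold pvCond; exact decide_eq_false h
        rw [if_neg h]
        simp [List.filter, hc]
  | cons x xs ih =>
      intro chosen found
      have hsum : chosen.sum + x = (chosen ++ [x]).sum := by simp
      show pvWalkB t n xs chosen.sum chosen (pvWalkB t n xs (chosen.sum + x) (chosen ++ [x]) found) = _
      rw [hsum, ih (chosen ++ [x]) found, ih chosen]
      have hmap : (pvSubs xs).map ((chosen ++ [x]) ++ ·)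
          = ((pvSubs xs).map (x :: ·)).map (chosen ++ ·) := by
        rw [List.map_map]
        apply List.map_congr_left
        intro c _
        simp
      rw [hmap]
      simp [pvSubs, List.map_append, List.filter_append, List.append_assoc]

theorem pvCombos_eq : ∀ (xs : List Int) (k : Nat),
    PySem.List.combinations xs k = (pvSubs xs).filter (fun c => c.length == k) := by
  intro xs
  induction xs with
  | nil =>
      intro k
      cases k with
      | zero => simp [PySem.List.combinations_zero, pvSubs]
      | succ k => simp [PySem.List.combinations_nil_succ, pvSubs]
  | cons x xs ih =>
      intro k
      cases k with
      | zero =>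
          rw [PySem.List.combinations_zero]
          simp only [pvSubs, List.filter_append, List.filter_map]
          rw [← PySem.List.combinations_zero xs, ih 0]
          simp [Function.comp]
      | succ k =>
          rw [PySem.List.combinations_cons_succ, ih k, ih (k + 1)]
          show _ = List.filter _ (List.map _ (pvSubs xs) ++ pvSubs xs)
          rw [List.filter_append, List.filter_map]
          congr 1
          exact congrArg (List.map _) (List.filter_congr (fun c _ => by simp))

-- members of found satisfy the DFS condition
theorem pvMem_found {t : Int} {n : Nat} {S : List (List Int)} {c : List Int}
    (hc : c ∈ S.filter (pvCond t n)) : c.sum = t ∧ 1 ≤ c.length ∧ c.length < n := by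
  have := List.mem_filter.mp hc
  simpa [pvCond] using this.2

-- matches for a size k inside the admissible band, expressed through found
theorem pvMatches_eq (parcels : List Int) (t : Int) (k : Nat)
    (hk1 : 1 ≤ k) (hk2 : k < parcels.length) :
    pvMatchesA parcels t k
      = ((pvSubs parcels).filter (pvCond t parcels.length)).filter (fun c => c.length == k) := by
  unfold pvMatchesA
  rw [pvCombos_eq, List.filter_filter, List.filter_filter]
  apply List.filter_congr
  intro c _
  rw [Bool.eq_iff_iff]
  by_cases h : c.length = k
  · simp [pvCond, h, hk1, hk2]
  · simp [pvCond, h]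

theorem pvLoopA_nil (parcels : List Int) (t : Int) (ks : List Nat)
    (h : ∀ k ∈ ks, pvMatchesA parcels t k = []) : pvLoopA parcels t ks = [] := by
  induction ks with
  | nil => rfl
  | cons k ks ih =>
      simp only [pvLoopA]
      rw [h k (by simp)]
      simp only [List.isEmpty_nil, if_true]
      exact ih (fun j hj => h j (by simp [hj]))

theorem pvLoopA_min (parcels : List Int) (t : Int) (b : Nat)
    (F : List (List Int)) (hF : F = (pvSubs parcels).filter (pvCond t parcels.length))
    (hmem : ∃ c ∈ F, c.length = b) (hmin : ∀ c ∈ F, b ≤ c.length) :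
    ∀ (m a : Nat), 1 ≤ a → a ≤ b → b < a + m →
      pvLoopA parcels t (List.range' a m) = F.filter (fun c => c.length == b) := by
  intro m
  induction m with
  | zero => intro a _ h1 h2; omega
  | succ m ih =>
      intro a ha hab hbm
      obtain ⟨c0, hc0F, hc0len⟩ := hmem
      have hbn : b < parcels.length := hc0len ▸ (pvMem_found (hF ▸ hc0F)).2.2
      rw [List.range'_succ]
      simp only [pvLoopA]
      by_cases hab' : a = b
      · subst hab'
        rw [pvMatches_eq parcels t a ha hbn, ← hF]
        have hne : c0 ∈ F.filter (fun c => c.length == a) :=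
          List.mem_filter.mpr ⟨hc0F, by simp [hc0len]⟩
        have : (F.filter (fun c => c.length == a)).isEmpty = false := by
          cases h : F.filter (fun c => c.length == a) with
          | nil => rw [h] at hne; simp at hne
          | cons y ys => simp [List.isEmpty]
        rw [this]
        simp
      · have halt : a < b := lt_of_le_of_ne hab hab'
        have hempty : pvMatchesA parcels t a = [] := by
          rw [pvMatches_eq parcels t a ha (by omega), ← hF]
          rw [List.filter_eq_nil_iff]
          intro c hc hlen
          have hb := hmin c hc
          have : c.length = a := by simpa using hlen
          omega
        rw [hempty]
        simp only [List.isEmpty_nil, if_true]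
        exact ih (a + 1) (by omega) (by omega) (by omega)

-- F as pvWalkB computes it
theorem pvFound_eq (t : Int) (n : Nat) (parcels : List Int) :
    pvWalkB t n parcels 0 [] [] = (pvSubs parcels).filter (pvCond t n) := by
  have h := pvWalkB_eq t n parcels [] []
  simpa using h

-- ===== VERDICT (by name: the statement is the Claim_ definition above) =====
theorem smallest_first_groups_spec : Claim_equal_smallest_first_groups := by
  intro parcels groups _ _
  unfold Spec_smallest_first_groups
  simp only [smallest_first_groups, smallest_first_groups_alt]
  set t := PySem.Int.floordiv parcels.sum groups with ht
  set n := parcels.length with hn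
  rw [pvFound_eq]
  set F := (pvSubs parcels).filter (pvCond t n) with hF
  cases hmin : PySem.List.min? (F.map List.length) (fun x => x) with
  | none =>
      have hFnil : F = [] := by
        have := PySem.List.min?_eq_none_iff (xs := F.map List.length) (key := fun x => x) |>.mp hmin
        simpa using this
      apply pvLoopA_nil
      intro k hk
      obtain ⟨i, hi, hki⟩ := List.mem_range'.mp hk
      have h1 : 1 ≤ k := by omega
      have h2 : k < n := by omega
      rw [pvMatches_eq parcels t k h1 h2, ← hF, hFnil]
      rfl
  | some b =>
      have hbmem : b ∈ F.map List.length := PySem.List.min?_mem hmin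
      obtain ⟨c0, hc0F, hc0len⟩ := List.mem_map.mp hbmem
      have hmin' : ∀ c ∈ F, b ≤ c.length := by
        intro c hc
        have := PySem.List.min?_isMin hmin (c.length) (List.mem_map_of_mem hc)
        simpa using this
      have hc0 := pvMem_found (hF ▸ hc0F)
      have hb1 : 1 ≤ b := hc0len ▸ hc0.2.1
      have hbn : b < n := hc0len ▸ hc0.2.2
      exact pvLoopA_min parcels t b F hF ⟨c0, hc0F, hc0len⟩ hmin' (n - 1) 1
        le_rfl hb1 (by omega)
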